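-- pv_equiv track=rewrite | github.com/davendw49/gakg | code/paperknowledge/paperentity/paperkg_ee.py | useless_detect
-- ===== SOURCE A (Python) =====
-- def useless_detect(entity):
--     """
--     detect useless entity
--     """
--     fh = "~!@#$%^&*()_+-*/<>,.[]\/ "
--     sz = "0123456789"
--     flag = 0
--     for e in entity:
--         if e in fh or e in sz:
--             flag += 1
--     if flag == len(entity):
--         return True
--     else:
--         return False
-- ===== SOURCE B (Python) =====
-- def useless_detect(entity):
--     """
--     detect useless entity
--     """
--     fh = "~!@#$%^&*()_+-*/<>,.[]\/ "
--     sz = "0123456789"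
--     return entity.translate(str.maketrans("", "", fh + sz)) == ""
-- ===== Notes on version B (the rewrite author's own statement) =====
-- stated objective: idiomatic
-- what changed: B builds a str.maketrans deletion table for the allowed alphabet fh+sz, strips those characters with str.translate, and returns whether the residual string is empty, instead of A's per-character counting loop compared against len(entity).
import Mathlib
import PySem

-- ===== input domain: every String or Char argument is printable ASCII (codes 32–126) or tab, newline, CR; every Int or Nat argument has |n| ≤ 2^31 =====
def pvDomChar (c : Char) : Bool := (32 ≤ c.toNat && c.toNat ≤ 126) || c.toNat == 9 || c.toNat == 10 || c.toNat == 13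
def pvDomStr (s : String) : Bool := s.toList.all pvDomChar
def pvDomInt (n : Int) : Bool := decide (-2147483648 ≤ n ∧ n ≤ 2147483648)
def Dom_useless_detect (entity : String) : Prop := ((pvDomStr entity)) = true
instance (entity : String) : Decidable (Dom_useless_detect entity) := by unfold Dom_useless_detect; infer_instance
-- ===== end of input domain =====

-- B deletes the allowed characters (str.translate deletion table) and checks the residue is empty, instead of A's counting loop (idiomatic).


-- ===== PORT A =====
def useless_detect (entity : String) : Bool :=
  let fh := "~!@#$%^&*()_+-*/<>,.[]\\/ "
  let sz := "0123456789"
  let flag := entity.toList.foldl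
    (fun flag e => if fh.toList.contains e || sz.toList.contains e then flag + 1 else flag)
    (0 : Int)
  if flag = (entity.toList.length : Int) then true else false

-- ===== PORT B =====
-- str.translate with a maketrans("", "", del) table deletes exactly the chars of del:
-- ported as a filter keeping the chars NOT in the deletion alphabet; '== ""' is the emptiness test.
def useless_detect_alt (entity : String) : Bool :=
  let fh := "~!@#$%^&*()_+-*/<>,.[]\\/ "
  let sz := "0123456789"
  decide ((entity.toList.filter (fun c => !((fh ++ sz).toList.contains c))) = [])

-- ===== PRECONDITION & SPEC =====
def Spec_useless_detect (entity : String) (out : Bool) : Prop := out = useless_detect_alt entity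
instance (entity : String) (out : Bool) : Decidable (Spec_useless_detect entity out) := by unfold Spec_useless_detect; infer_instance

-- ===== CLAIM (what is proved, stated in full; the proofs are below) =====
def Claim_equal_useless_detect : Prop := ∀ (entity : String), Dom_useless_detect entity → Spec_useless_detect entity (useless_detect entity)

-- ===== LEMMAS AND PROOFS =====
theorem count_foldl (p : Char → Bool) (l : List Char) (n : Int) :
    l.foldl (fun flag e => if p e then flag + 1 else flag) n = n + (l.countP p : Int) := by
  induction l generalizing n with
  | nil => simp
  | cons c t ih =>
    simp only [List.foldl_cons, List.countP_cons, ih]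
    by_cases h : p c = true
    · simp only [h, if_true, Nat.cast_add, Nat.cast_one]; ring
    · simp [h]

-- ===== VERDICT (by name: the statement is the Claim_ definition above) =====
theorem useless_detect_spec : Claim_equal_useless_detect := by
  intro entity _
  unfold Spec_useless_detect useless_detect useless_detect_alt
  simp only [count_foldl, zero_add]
  rw [Bool.eq_iff_iff]
  have hp : ∀ c : Char,
      ("~!@#$%^&*()_+-*/<>,.[]\\/ ".toList.contains c || "0123456789".toList.contains c)
        = ("~!@#$%^&*()_+-*/<>,.[]\\/ " ++ "0123456789").toList.contains c := by
    intro c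
    rw [String.toList_append, List.contains_append]
  constructor
  · intro h
    split_ifs at h with hc
    apply decide_eq_true
    rw [List.filter_eq_nil_iff]
    intro c hcm
    have hall := List.countP_eq_length.mp (by exact_mod_cast hc) c hcm
    rw [hp c] at hall
    intro hbad
    rw [hall] at hbad
    simp at hbad
  · intro h
    have h' := of_decide_eq_true h
    rw [List.filter_eq_nil_iff] at h'
    have hcount : entity.toList.countP
        (fun e => "~!@#$%^&*()_+-*/<>,.[]\\/ ".toList.contains e || "0123456789".toList.contains e)
        = entity.toList.length := by
      apply List.countP_eq_length.mpr
      intro c hcm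
      show ("~!@#$%^&*()_+-*/<>,.[]\\/ ".toList.contains c || "0123456789".toList.contains c) = true
      rw [hp c]
      have hnb := h' c hcm
      revert hnb
      generalize (("~!@#$%^&*()_+-*/<>,.[]\\/ " ++ "0123456789").toList.contains c) = b
      intro hnb
      cases b
      · exact absurd rfl hnb
      · rfl
    split_ifs with hc
    · rfl
    · exact absurd (by exact_mod_cast hcount) hc
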